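-- pv_equiv track=rewrite | github.com/Project-Phaistos/Ventris1 | pillar1/scripts/jaccard_cypriot_validation.py | build_cypriot_ground_truth
-- ===== SOURCE A (Python) =====
-- from collections import Counter, defaultdict
--
-- def build_cypriot_ground_truth(
--     signs: list[str],
--     sign_info: dict[str, dict[str, str]],
-- ) -> tuple[dict[str, int], dict[str, int]]:
--     """Build consonant and vowel ground-truth integer labels.
--
--     Returns (consonant_labels, vowel_labels) as dicts: sign -> int label.
--     """
--     cons_series: dict[str, list[str]] = defaultdict(list)
--     vowel_classes: dict[str, list[str]] = defaultdict(list)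
--
--     for sign in signs:
--         if sign not in sign_info:
--             continue
--         c = sign_info[sign]["consonant"]
--         v = sign_info[sign]["vowel"]
--         cons_series[c].append(sign)
--         vowel_classes[v].append(sign)
--
--     cons_label: dict[str, int] = {}
--     for idx, name in enumerate(sorted(cons_series.keys())):
--         for s in cons_series[name]:
--             cons_label[s] = idx
--
--     vowel_label: dict[str, int] = {}
--     for idx, name in enumerate(sorted(vowel_classes.keys())):
--         for s in vowel_classes[name]:
--             vowel_label[s] = idx
--
--     return cons_label, vowel_label
-- ===== SOURCE B (Python) =====
-- def build_cypriot_ground_truth(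
--     signs: list[str],
--     sign_info: dict[str, dict[str, str]],
-- ) -> tuple[dict[str, int], dict[str, int]]:
--     """Stable-sort re-implementation: sort the present signs by their class
--     value once per feature; ranks increase at each class boundary."""
--     present = list(dict.fromkeys(s for s in signs if s in sign_info))
--
--     def labels(key: str) -> dict[str, int]:
--         out: dict[str, int] = {}
--         prev = None
--         rank = -1
--         for s in sorted(present, key=lambda s: sign_info[s][key]):
--             v = sign_info[s][key]
--             if v != prev:
--                 rank += 1
--                 prev = v
--             out[s] = rank
--         return out
--
--     return labels("consonant"), labels("vowel")
-- ===== Notes on version B (the rewrite author's own statement) =====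
-- stated objective: alternative
-- what changed: Replaces the defaultdict grouping pass plus nested per-class emit loops with a single stable sort of the present signs by class value and one linear scan that bumps the rank at each class boundary.
import Mathlib
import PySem

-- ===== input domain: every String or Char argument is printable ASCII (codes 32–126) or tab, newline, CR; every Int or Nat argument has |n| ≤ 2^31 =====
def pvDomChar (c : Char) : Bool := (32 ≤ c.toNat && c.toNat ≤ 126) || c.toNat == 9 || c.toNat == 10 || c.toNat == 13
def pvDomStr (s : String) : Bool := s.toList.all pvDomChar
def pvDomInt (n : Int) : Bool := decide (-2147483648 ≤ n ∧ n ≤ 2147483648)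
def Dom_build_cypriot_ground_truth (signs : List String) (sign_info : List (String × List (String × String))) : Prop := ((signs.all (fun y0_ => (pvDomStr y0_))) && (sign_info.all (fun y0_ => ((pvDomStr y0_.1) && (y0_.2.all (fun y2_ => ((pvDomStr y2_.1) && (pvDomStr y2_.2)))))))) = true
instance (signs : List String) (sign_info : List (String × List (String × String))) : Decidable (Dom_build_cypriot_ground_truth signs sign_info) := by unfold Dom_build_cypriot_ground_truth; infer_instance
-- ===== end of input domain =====

-- B replaces A's defaultdict grouping + nested per-class emit loops by one stable sort of the
-- present signs per feature and a single boundary-counting scan (alternative algorithm, same result).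

-- ===== PORT A =====
def build_cypriot_ground_truth (signs : List String) (sign_info : List (String × List (String × String))) : (List (String × Int)) × (List (String × Int)) :=
  let info : PySem.Dict String (List (String × String)) := PySem.Dict.mk sign_info
  let grouped := signs.foldl (fun (acc : PySem.Dict String (List String) × PySem.Dict String (List String)) sign =>
      if info.contains sign then
        let c := (PySem.Dict.mk (info.getD sign [])).getD "consonant" ""
        let v := (PySem.Dict.mk (info.getD sign [])).getD "vowel" ""
        (acc.1.modify c [] (fun l => l ++ [sign]), acc.2.modify v [] (fun l => l ++ [sign]))
      else acc) (PySem.Dict.empty, PySem.Dict.empty)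
  let cons_label := (PySem.List.enumerate (PySem.List.sorted grouped.1.keys (fun x => x) false) 0).foldl
      (fun (d : PySem.Dict String Int) p => (grouped.1.getD p.2 []).foldl (fun d s => d.insert s p.1) d) PySem.Dict.empty
  let vowel_label := (PySem.List.enumerate (PySem.List.sorted grouped.2.keys (fun x => x) false) 0).foldl
      (fun (d : PySem.Dict String Int) p => (grouped.2.getD p.2 []).foldl (fun d s => d.insert s p.1) d) PySem.Dict.empty
  (cons_label.items, vowel_label.items)

-- ===== PORT B =====
-- helper = the inner function `labels` of Source B
def pvAltLabels (present : List String) (info : PySem.Dict String (List (String × String))) (key : String) : PySem.Dict String Int :=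
  ((PySem.List.sorted present (fun s => (PySem.Dict.mk (info.getD s [])).getD key "") false).foldl
    (fun (st : PySem.Dict String Int × Option String × Int) s =>
      let v := (PySem.Dict.mk (info.getD s [])).getD key ""
      let pr : Option String × Int := if some v = st.2.1 then st.2 else (some v, st.2.2 + 1)
      (st.1.insert s pr.2, pr))
    (PySem.Dict.empty, none, -1)).1

def build_cypriot_ground_truth_alt (signs : List String) (sign_info : List (String × List (String × String))) : (List (String × Int)) × (List (String × Int)) :=
  let info : PySem.Dict String (List (String × String)) := PySem.Dict.mk sign_info
  let present := PySem.List.dedup (signs.filter (fun s => info.contains s))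
  ((pvAltLabels present info "consonant").items, (pvAltLabels present info "vowel").items)

-- ===== PRECONDITION & SPEC =====
-- Pre_ excludes exactly the inputs on which Python A raises KeyError: a sign listed in signs and
-- present in sign_info whose info record lacks a "consonant" or "vowel" entry.
def Pre_build_cypriot_ground_truth (signs : List String) (sign_info : List (String × List (String × String))) : Prop :=
  ∀ s ∈ signs, (((PySem.Dict.mk sign_info).get? s).all
    (fun r => (PySem.Dict.mk r).contains "consonant" && (PySem.Dict.mk r).contains "vowel")) = true
instance (signs : List String) (sign_info : List (String × List (String × String))) : Decidable (Pre_build_cypriot_ground_truth signs sign_info) := by unfold Pre_build_cypriot_ground_truth; infer_instance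

def pvWitness_build_cypriot_ground_truth : List String × (List (String × List (String × String))) :=
  (["ta", "ko", "xx"], [("ta", [("consonant", "t"), ("vowel", "a")]), ("ko", [("consonant", "k"), ("vowel", "o")])])

def Spec_build_cypriot_ground_truth (signs : List String) (sign_info : List (String × List (String × String))) (out : (List (String × Int)) × (List (String × Int))) : Prop := out = build_cypriot_ground_truth_alt signs sign_info
instance (signs : List String) (sign_info : List (String × List (String × String))) (out : (List (String × Int)) × (List (String × Int))) : Decidable (Spec_build_cypriot_ground_truth signs sign_info out) := by unfold Spec_build_cypriot_ground_truth; infer_instance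

-- ===== CLAIM (what is proved, stated in full; the proofs are below) =====
def Claim_equal_build_cypriot_ground_truth : Prop := ∀ (signs : List String) (sign_info : List (String × List (String × String))), Dom_build_cypriot_ground_truth signs sign_info → Pre_build_cypriot_ground_truth signs sign_info → Spec_build_cypriot_ground_truth signs sign_info (build_cypriot_ground_truth signs sign_info)

-- ===== LEMMAS AND PROOFS =====

theorem pv_foldl_prod_if {β σ₁ σ₂ : Type} (c : β → Bool) (f : σ₁ → β → σ₁) (g : σ₂ → β → σ₂)
    (l : List β) (a : σ₁) (b : σ₂) :
    l.foldl (fun s e => if c e then (f s.1 e, g s.2 e) else s) (a, b)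
      = (l.foldl (fun s e => if c e then f s e else s) a,
         l.foldl (fun s e => if c e then g s e else s) b) := by
  induction l generalizing a b with
  | nil => rfl
  | cons x t ih => cases hc : c x <;> simp [hc, ih]

theorem pv_insertBy_append (p : String → String → Bool) (x : String) (A B : List String)
    (h : ∀ y ∈ A, p x y = false) :
    PySem.List.insertBy p x (A ++ B) = A ++ PySem.List.insertBy p x B := by
  induction A with
  | nil => rfl
  | cons y t ih =>
    have hy := h y (by simp)
    simp only [List.cons_append, PySem.List.insertBy, hy]
    simp [ih (fun z hz => h z (by simp [hz]))]

theorem pv_insertBy_front (p : String → String → Bool) (x : String) (B : List String)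
    (h : ∀ y ∈ B, p x y = true) :
    PySem.List.insertBy p x B = x :: B := by
  cases B with
  | nil => rfl
  | cons y t => simp [PySem.List.insertBy, h y (by simp)]

theorem pv_dedup_filter (p : String → Bool) (xs : List String) :
    PySem.List.dedup (xs.filter p) = (PySem.List.dedup xs).filter p := by
  induction xs with
  | nil => rfl
  | cons x t ih =>
    simp only [PySem.List.dedup] at *
    by_cases hp : p x
    · rw [List.filter_cons_of_pos hp, PySem.Set.ofList_cons, PySem.Set.ofList_cons,
        List.filter_cons_of_pos hp, ih]
      simp only [PySem.Set.discard, List.filter_filter]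
      congr 1
      apply List.filter_congr
      intro y _
      cases hyx : y == x <;> simp
    · rw [List.filter_cons_of_neg hp, PySem.Set.ofList_cons, List.filter_cons_of_neg hp, ih]
      simp only [PySem.Set.discard, List.filter_filter]
      apply List.filter_congr
      intro y _
      cases hyx : y == x
      · simp
      · have : y = x := by simpa using hyx
        subst this
        simp [hp]

theorem pv_groupB_tail (f : String → String) (c : String) :
    ∀ (l : List String) (d : PySem.Dict String Int) (r : Int), (∀ s ∈ l, f s = c) →
    (l.foldl (fun (st : PySem.Dict String Int × Option String × Int) s =>
        let v := f s
        let pr : Option String × Int := if some v = st.2.1 then st.2 else (some v, st.2.2 + 1)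
        (st.1.insert s pr.2, pr)) (d, some c, r))
      = (l.foldl (fun d s => d.insert s r) d, some c, r) := by
  intro l
  induction l with
  | nil => intro d r _; rfl
  | cons s t ih =>
    intro d r h
    have hs : f s = c := h s (by simp)
    simp only [List.foldl_cons, hs, if_pos]
    exact ih _ r (fun z hz => h z (by simp [hz]))

theorem pv_groupB (f : String → String) (c : String) (l : List String) (d : PySem.Dict String Int)
    (prev : Option String) (r : Int) (hne : l ≠ []) (hf : ∀ s ∈ l, f s = c) (hp : prev ≠ some c) :
    (l.foldl (fun (st : PySem.Dict String Int × Option String × Int) s =>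
        let v := f s
        let pr : Option String × Int := if some v = st.2.1 then st.2 else (some v, st.2.2 + 1)
        (st.1.insert s pr.2, pr)) (d, prev, r))
      = (l.foldl (fun d s => d.insert s (r + 1)) d, some c, r + 1) := by
  cases l with
  | nil => exact absurd rfl hne
  | cons s t =>
    have hs : f s = c := hf s (by simp)
    have hne' : ¬ (some c = prev) := fun h => hp h.symm
    simp only [List.foldl_cons, hs]
    rw [if_neg hne']
    exact pv_groupB_tail f c t _ (r + 1) (fun z hz => hf z (by simp [hz]))
theorem pv_sortedClasses_eq (xs : List String) (f : String → String) :
    PySem.List.sorted (PySem.List.dedup ((PySem.List.dedup xs).map f)) (fun x => x) false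
      = PySem.List.sorted (PySem.List.dedup (xs.map f)) (fun x => x) false := by
  apply PySem.List.sorted_eq_sorted_of_perm _ _ _ (fun a b h => h)
  rw [List.perm_ext_iff_of_nodup (by simp [PySem.List.dedup_eq_ofList, PySem.Set.nodup_ofList])
    (by simp [PySem.List.dedup_eq_ofList, PySem.Set.nodup_ofList])]
  intro a
  simp [List.mem_map]

theorem pv_insert_noop (d : PySem.Dict String Int) (s : String) (i : Int)
    (hnd : d.keys.Nodup) (h : d.get? s = some i) : d.insert s i = d := by
  have hc : d.contains s = true := by
    cases hcs : d.contains s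
    · rw [← PySem.Dict.get?_eq_none_iff_contains] at hcs
      rw [h] at hcs; cases hcs
    · rfl
  apply PySem.Dict.ext
  rw [PySem.Dict.items_insert_of_contains d i hc]
  have : ∀ p ∈ d.items, (if (p.1 == s) = true then (s, i) else p) = p := by
    intro p hp
    cases hps : p.1 == s
    · simp
    · have hps' : p.1 = s := by simpa using hps
      have hmem : (s, p.2) ∈ d.items := by rw [← hps']; exact hp
      have := PySem.Dict.get?_of_mem_items d hmem hnd
      rw [h] at this
      have hv : p.2 = i := by injection this.symm
      obtain ⟨p1, p2⟩ := p
      simp only at hps' hv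
      rw [hps', hv]
      simp
  rw [List.map_congr_left this, List.map_id']

theorem pv_insert_const_fold (l : List String) (i : Int) (d : PySem.Dict String Int)
    (hnd : d.keys.Nodup) (h : ∀ s ∈ l, d.get? s = none ∨ d.get? s = some i) :
    (l.foldl (fun d s => d.insert s i) d).items
      = d.items ++ ((PySem.List.dedup l).filter (fun s => !(d.contains s))).map (fun s => (s, i)) := by
  induction l generalizing d with
  | nil => simp
  | cons s t ih =>
    simp only [List.foldl_cons, PySem.List.dedup, PySem.Set.ofList_cons]
    rcases h s (by simp) with hn | hs
    · -- fresh key: appended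
      have hc : d.contains s = false := (PySem.Dict.get?_eq_none_iff_contains d s).1 hn
      have hitems := PySem.Dict.items_insert_of_not_contains d i hc
      have hnd' := PySem.Dict.nodup_keys_insert d s i hnd
      have h' : ∀ u ∈ t, (d.insert s i).get? u = none ∨ (d.insert s i).get? u = some i := by
        intro u hu
        rw [PySem.Dict.get?_insert]
        by_cases hus : u = s
        · right; simp [hus]
        · rw [if_neg hus]; exact h u (by simp [hu])
      rw [ih _ hnd' h', hitems]
      rw [List.filter_cons_of_pos (by simp [hc]), List.map_cons]
      simp only [List.append_assoc, List.cons_append, List.nil_append]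
      congr 2
      -- (dedup t).filter (!(insert).contains) = (discard (dedup t) s).filter (!d.contains)
      simp only [PySem.Set.discard, List.filter_filter]
      congr 1
      apply List.filter_congr
      intro y _
      cases hys : y == s <;> simp [PySem.Dict.contains_insert, hys]
    · -- key already present with value i: no-op
      have hc : d.contains s = true := by
        cases hcs : d.contains s
        · rw [← PySem.Dict.get?_eq_none_iff_contains] at hcs; rw [hs] at hcs; cases hcs
        · rfl
      rw [pv_insert_noop d s i hnd hs]
      rw [ih _ hnd (fun u hu => h u (by simp [hu]))]
      congr 1
      rw [List.filter_cons_of_neg (by simp [hc])]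
      simp only [PySem.Set.discard, List.filter_filter]
      congr 1
      apply List.filter_congr
      intro y _
      cases hys : y == s
      · simp
      · have : y = s := by simpa using hys
        subst this
        simp [hc]

theorem pv_contains_fold (l : List String) (i : Int) (d : PySem.Dict String Int) (s : String) :
    (l.foldl (fun d s => d.insert s i) d).contains s = (d.contains s || decide (s ∈ l)) := by
  have hk := PySem.Dict.keys_foldl_insert l (fun _ _ => i) d
  rw [PySem.Dict.contains_eq_decide_mem_keys, hk, PySem.Dict.contains_eq_decide_mem_keys]
  by_cases hm : s ∈ PySem.Set.update d.keys l
  · rw [PySem.Set.mem_update] at hm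
    simp [PySem.Set.mem_update, hm]
  · rw [PySem.Set.mem_update] at hm
    rw [not_or] at hm
    simp [PySem.Set.mem_update, hm.1, hm.2]

theorem pv_labelA (pres : List String) (f : String → String) :
    ∀ (C : List String) (n : Int) (d : PySem.Dict String Int), d.keys.Nodup → C.Nodup →
    (∀ c ∈ C, ∀ s ∈ pres, f s = c → d.contains s = false) →
    ((PySem.List.enumerate C n).foldl
        (fun d p => (pres.filter (fun s => f s == p.2)).foldl (fun d s => d.insert s p.1) d) d).items
      = d.items ++ (PySem.List.enumerate C n).flatMap
          (fun p => ((PySem.List.dedup pres).filter (fun s => f s == p.2)).map (fun s => (s, p.1))) := by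
  intro C
  induction C with
  | nil => intro n d _ _ _; simp [PySem.List.enumerate]
  | cons c C' ih =>
    intro n d hnd hCnd hcont
    rw [PySem.List.enumerate_cons]
    simp only [List.foldl_cons, List.flatMap_cons]
    have hmem : ∀ s ∈ pres.filter (fun s => f s == c), s ∈ pres ∧ f s = c := by
      intro s hs
      rw [List.mem_filter] at hs
      exact ⟨hs.1, by simpa using hs.2⟩
    have hfresh : ∀ s ∈ pres.filter (fun s => f s == c), d.contains s = false := by
      intro s hs
      exact hcont c (by simp) s (hmem s hs).1 (hmem s hs).2
    have hget : ∀ s ∈ pres.filter (fun s => f s == c), d.get? s = none ∨ d.get? s = some n := by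
      intro s hs
      exact Or.inl ((PySem.Dict.get?_eq_none_iff_contains d s).2 (hfresh s hs))
    set d1 := (pres.filter (fun s => f s == c)).foldl (fun d s => d.insert s n) d with hd1
    have hd1items : d1.items = d.items ++
        ((PySem.List.dedup pres).filter (fun s => f s == c)).map (fun s => (s, n)) := by
      rw [hd1, pv_insert_const_fold _ _ _ hnd hget, pv_dedup_filter]
      congr 1
      apply congrArg
      apply List.filter_eq_self.2
      intro s hs
      rw [List.mem_filter] at hs
      have hsp : s ∈ pres := (PySem.List.mem_dedup _ _).1 hs.1
      have hfc : f s = c := by simpa using hs.2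
      simp [hcont c (by simp) s hsp hfc]
    have hnd1 : d1.keys.Nodup := PySem.Dict.nodup_keys_foldl_insert _ (fun _ _ => n) d hnd
    have hcont1 : ∀ c' ∈ C', ∀ s ∈ pres, f s = c' → d1.contains s = false := by
      intro c' hc' s hsp hfs
      rw [hd1, pv_contains_fold]
      have h1 : d.contains s = false := hcont c' (by simp [hc']) s hsp hfs
      have h2 : s ∉ pres.filter (fun s => f s == c) := by
        intro hmem'
        have := (hmem s hmem').2
        rw [hfs] at this
        exact (List.nodup_cons.1 hCnd).1 (this ▸ hc')
      simp [h1, h2]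
    rw [ih (n + 1) d1 hnd1 (List.nodup_cons.1 hCnd).2 hcont1, hd1items]
    simp [List.append_assoc]

theorem pv_labelB (pres : List String) (f : String → String) :
    ∀ (C : List String) (d : PySem.Dict String Int) (prev : Option String) (r : Int),
    d.keys.Nodup → C.Nodup → (∀ c ∈ C, prev ≠ some c) →
    (∀ c ∈ C, ∀ s ∈ pres, f s = c → d.contains s = false) →
    (∀ c ∈ C, (PySem.List.dedup pres).filter (fun s => f s == c) ≠ []) →
    ((C.flatMap (fun c => (PySem.List.dedup pres).filter (fun s => f s == c))).foldl
        (fun (st : PySem.Dict String Int × Option String × Int) s =>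
          let v := f s
          let pr : Option String × Int := if some v = st.2.1 then st.2 else (some v, st.2.2 + 1)
          (st.1.insert s pr.2, pr)) (d, prev, r)).1.items
      = d.items ++ (PySem.List.enumerate C (r + 1)).flatMap
          (fun p => ((PySem.List.dedup pres).filter (fun s => f s == p.2)).map (fun s => (s, p.1))) := by
  intro C
  induction C with
  | nil => intro d prev r _ _ _ _ _; simp [PySem.List.enumerate]
  | cons c C' ih =>
    intro d prev r hnd hCnd hprev hcont hne
    rw [List.flatMap_cons, List.foldl_append, PySem.List.enumerate_cons, List.flatMap_cons]
    set lc := (PySem.List.dedup pres).filter (fun s => f s == c) with hlc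
    have hlcnd : lc.Nodup := by
      rw [hlc]
      exact List.Nodup.filter _ (by
        rw [PySem.List.dedup_eq_ofList]; exact PySem.Set.nodup_ofList pres)
    have hmem : ∀ s ∈ lc, s ∈ pres ∧ f s = c := by
      intro s hs
      rw [hlc, List.mem_filter] at hs
      exact ⟨(PySem.List.mem_dedup _ _).1 hs.1, by simpa using hs.2⟩
    have hfresh : ∀ s ∈ lc, d.contains s = false :=
      fun s hs => hcont c (by simp) s (hmem s hs).1 (hmem s hs).2
    rw [pv_groupB f c lc d prev r (hne c (by simp)) (fun s hs => (hmem s hs).2)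
      (hprev c (by simp))]
    set d1 := lc.foldl (fun d s => d.insert s (r + 1)) d with hd1
    have hd1items : d1.items = d.items ++ lc.map (fun s => (s, r + 1)) := by
      rw [hd1, pv_insert_const_fold _ _ _ hnd
        (fun s hs => Or.inl ((PySem.Dict.get?_eq_none_iff_contains d s).2 (hfresh s hs)))]
      congr 1
      have hdd : PySem.List.dedup lc = lc := by
        rw [PySem.List.dedup_eq_ofList]
        exact PySem.Set.ofList_eq_self_of_nodup _ hlcnd
      rw [hdd]
      apply congrArg
      apply List.filter_eq_self.2
      intro s hs
      simp [hfresh s hs]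
    have hnd1 : d1.keys.Nodup := PySem.Dict.nodup_keys_foldl_insert _ (fun _ _ => r + 1) d hnd
    have hcont1 : ∀ c' ∈ C', ∀ s ∈ pres, f s = c' → d1.contains s = false := by
      intro c' hc' s hsp hfs
      rw [hd1, pv_contains_fold]
      have h1 : d.contains s = false := hcont c' (by simp [hc']) s hsp hfs
      have h2 : s ∉ lc := by
        intro hmem'
        have := (hmem s hmem').2
        rw [hfs] at this
        exact (List.nodup_cons.1 hCnd).1 (this ▸ hc')
      simp [h1, h2]
    have hprev1 : ∀ c' ∈ C', (some c : Option String) ≠ some c' := by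
      intro c' hc' h
      exact (List.nodup_cons.1 hCnd).1 ((Option.some_injective _ h) ▸ hc')
    have harith : r + 1 + 1 = r + 2 := by ring
    rw [ih d1 (some c) (r + 1) hnd1 (List.nodup_cons.1 hCnd).2 hprev1 hcont1
      (fun c' hc' => hne c' (by simp [hc'])), hd1items]
    simp [List.append_assoc]

theorem pv_flatMap_congr {α β : Type} (l : List α) (g h : α → List β)
    (he : ∀ a ∈ l, g a = h a) : l.flatMap g = l.flatMap h := by
  induction l with
  | nil => rfl
  | cons a t ih =>
    rw [List.flatMap_cons, List.flatMap_cons, he a (by simp), ih (fun b hb => he b (by simp [hb]))]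

theorem pv_dropWhile_head {p : String → Bool} : ∀ (l : List String) (y : String) (ys : List String),
    l.dropWhile p = y :: ys → p y = false := by
  intro l
  induction l with
  | nil => intro y ys h; cases h
  | cons a t ih =>
    intro y ys h
    rw [List.dropWhile_cons] at h
    by_cases hp : p a
    · rw [if_pos hp] at h; exact ih y ys h
    · rw [if_neg hp] at h
      injection h with h1 _
      rw [← h1]
      exact Bool.eq_false_iff.mpr hp

theorem pv_sorted_groups (xs : List String) (f : String → String) :
    PySem.List.sorted xs f false
      = (PySem.List.sorted (PySem.List.dedup (xs.map f)) (fun x => x) false).flatMap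
          (fun c => xs.filter (fun t => f t == c)) := by
  induction xs using List.reverseRecOn with
  | nil => rfl
  | append_singleton xs x ih =>
    have hsx : PySem.List.sorted (xs ++ [x]) f false
        = PySem.List.insertBy (fun a b => decide (f a < f b)) x (PySem.List.sorted xs f false) := by
      rw [PySem.List.sorted_eq_foldl_insertBy (xs ++ [x]) f, List.foldl_append,
        PySem.List.sorted_eq_foldl_insertBy xs f]
      rfl
    rw [hsx, ih]
    have hCperm : (PySem.List.sorted (PySem.List.dedup (xs.map f)) (fun x => x) false).Perm
        (PySem.List.dedup (xs.map f)) := PySem.List.sorted_perm _ _ _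
    have hCpair : (PySem.List.sorted (PySem.List.dedup (xs.map f)) (fun x => x) false).Pairwise (· < ·) := by
      rw [PySem.List.dedup_eq_ofList]
      exact PySem.List.sorted_ofList_pairwise_lt (xs.map f)
    set v := f x with hv
    set S := PySem.List.dedup (xs.map f) with hS
    set C := PySem.List.sorted S (fun x => x) false with hC
    have hSiff : ∀ c, c ∈ S ↔ ∃ y ∈ xs, f y = c := by
      intro c
      rw [hS, PySem.List.mem_dedup]
      simp [List.mem_map, eq_comm]
    have hgrp_key : ∀ c, ∀ y ∈ xs.filter (fun t => f t == c), f y = c := by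
      intro c y hy
      rw [List.mem_filter] at hy
      simpa using hy.2
    have hdednew : PySem.List.dedup ((xs ++ [x]).map f) = PySem.Set.add S v := by
      rw [List.map_append, List.map_singleton, PySem.List.dedup_eq_ofList,
        PySem.Set.ofList_append_singleton, ← PySem.List.dedup_eq_ofList, ← hS]
    by_cases hvS : v ∈ S
    · -- existing class: x lands at the end of its group
      have hvC : v ∈ C := hCperm.mem_iff.2 hvS
      obtain ⟨T, D, hTD⟩ := List.append_of_mem hvC
      rw [hTD] at hCpair
      have hpair := List.pairwise_append.1 hCpair
      have hT : ∀ t ∈ T, t < v := fun t ht => hpair.2.2 t ht v (by simp)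
      have hD : ∀ e ∈ D, v < e := (List.pairwise_cons.1 hpair.2.1).1
      rw [hdednew, PySem.Set.add_of_mem hvS, ← hC, hTD]
      rw [List.flatMap_append, List.flatMap_cons, List.flatMap_append, List.flatMap_cons]
      rw [← List.append_assoc]
      rw [pv_insertBy_append _ x _ _ (by
        intro y hy
        rw [List.mem_append] at hy
        rcases hy with hy | hy
        · rw [List.mem_flatMap] at hy
          obtain ⟨t, ht, hyt⟩ := hy
          have hk := hgrp_key t y hyt
          exact decide_eq_false (by rw [hk]; exact fun h => lt_asymm h (hT t ht))
        · have hk := hgrp_key v y hy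
          exact decide_eq_false (by rw [hk]; exact lt_irrefl v))]
      rw [pv_insertBy_front _ x _ (by
        intro y hy
        rw [List.mem_flatMap] at hy
        obtain ⟨e, he, hye⟩ := hy
        have hk := hgrp_key e y hye
        exact decide_eq_true (by rw [hk]; exact hD e he))]
      have hTgrp : T.flatMap (fun c => (xs ++ [x]).filter (fun t => f t == c))
          = T.flatMap (fun c => xs.filter (fun t => f t == c)) := by
        apply pv_flatMap_congr
        intro c hc
        rw [List.filter_append]
        have hne : (f x == c) = false := beq_eq_false_iff_ne.mpr (hT c hc).ne'
        simp [hne]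
      have hDgrp : D.flatMap (fun c => (xs ++ [x]).filter (fun t => f t == c))
          = D.flatMap (fun c => xs.filter (fun t => f t == c)) := by
        apply pv_flatMap_congr
        intro c hc
        rw [List.filter_append]
        have hne : (f x == c) = false := beq_eq_false_iff_ne.mpr (hD c hc).ne
        simp [hne]
      have hgrpv : (xs ++ [x]).filter (fun t => f t == v) = xs.filter (fun t => f t == v) ++ [x] := by
        rw [List.filter_append]
        simp [← hv]
      rw [hTgrp, hDgrp, hgrpv]
      simp [List.append_assoc]
    · -- new class: x forms a fresh singleton group
      set T := C.takeWhile (fun c => decide (c < v)) with hTdef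
      set D := C.dropWhile (fun c => decide (c < v)) with hDdef
      have hsplit : T ++ D = C := List.takeWhile_append_dropWhile
      have hvC : v ∉ C := fun h => hvS (hCperm.mem_iff.1 h)
      have hT : ∀ t ∈ T, t < v := by
        intro t ht
        rw [hTdef] at ht
        exact of_decide_eq_true (List.mem_takeWhile_imp (p := fun c => decide (c < v)) ht)
      have hDpair : D.Pairwise (· < ·) := hCpair.sublist (List.dropWhile_sublist _)
      have hTpair : T.Pairwise (· < ·) := hCpair.sublist (List.takeWhile_sublist _)
      have hD : ∀ e ∈ D, v < e := by
        cases hDeq : D with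
        | nil => intro e he; cases he
        | cons h0 t0 =>
          intro e he
          have hh0 : decide (h0 < v) = false := pv_dropWhile_head C h0 t0 (by rw [← hDdef, hDeq])
          have hh0' : ¬ (h0 < v) := of_decide_eq_false hh0
          have hh0C : h0 ∈ C := (List.dropWhile_sublist _).subset (hDeq ▸ List.mem_cons_self)
          have hv_lt : v < h0 := lt_of_le_of_ne (not_lt.1 hh0') (fun h => hvC (h ▸ hh0C))
          rcases List.mem_cons.1 he with rfl | he'
          · exact hv_lt
          · exact hv_lt.trans ((List.pairwise_cons.1 (hDeq ▸ hDpair)).1 e he')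
      have hCnew : PySem.List.sorted (S ++ [v]) (fun x => x) false = T ++ v :: D := by
        apply PySem.List.sorted_eq_of_perm_of_pairwise_lt
        · have p1 : (T ++ v :: D).Perm (v :: (T ++ D)) := List.perm_middle
          rw [hsplit] at p1
          exact p1.trans ((hCperm.cons v).trans (List.perm_append_singleton v S).symm)
        · refine List.pairwise_append.2 ⟨hTpair, List.pairwise_cons.2 ⟨hD, hDpair⟩, ?_⟩
          intro a ha b hb
          rcases List.mem_cons.1 hb with rfl | hb'
          · exact hT a ha
          · exact (hT a ha).trans (hD b hb')
      rw [hdednew, PySem.Set.add_of_not_mem hvS, hCnew]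
      rw [← hsplit, List.flatMap_append]
      rw [pv_insertBy_append _ x _ _ (by
        intro y hy
        rw [List.mem_flatMap] at hy
        obtain ⟨t, ht, hyt⟩ := hy
        have hk := hgrp_key t y hyt
        exact decide_eq_false (by rw [hk]; exact fun h => lt_asymm h (hT t ht)))]
      rw [pv_insertBy_front _ x _ (by
        intro y hy
        rw [List.mem_flatMap] at hy
        obtain ⟨e, he, hye⟩ := hy
        have hk := hgrp_key e y hye
        exact decide_eq_true (by rw [hk]; exact hD e he))]
      rw [List.flatMap_append, List.flatMap_cons]
      have hTgrp : T.flatMap (fun c => (xs ++ [x]).filter (fun t => f t == c))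
          = T.flatMap (fun c => xs.filter (fun t => f t == c)) := by
        apply pv_flatMap_congr
        intro c hc
        rw [List.filter_append]
        have hne : (f x == c) = false := beq_eq_false_iff_ne.mpr (hT c hc).ne'
        simp [hne]
      have hDgrp : D.flatMap (fun c => (xs ++ [x]).filter (fun t => f t == c))
          = D.flatMap (fun c => xs.filter (fun t => f t == c)) := by
        apply pv_flatMap_congr
        intro c hc
        rw [List.filter_append]
        have hne : (f x == c) = false := beq_eq_false_iff_ne.mpr (hD c hc).ne
        simp [hne]
      have hgrpv : (xs ++ [x]).filter (fun t => f t == v) = [x] := by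
        rw [List.filter_append]
        have hnil : xs.filter (fun t => f t == v) = [] := by
          rw [List.filter_eq_nil_iff]
          intro y hy hbeq
          exact hvS ((hSiff v).2 ⟨y, hy, by simpa using hbeq⟩)
        simp [hnil, ← hv]
      rw [hTgrp, hDgrp, hgrpv]
      simp

theorem pv_one_key (signs : List String) (sign_info : List (String × List (String × String))) (key : String) :
    ((PySem.List.enumerate (PySem.List.sorted
        (signs.foldl (fun (d : PySem.Dict String (List String)) sign =>
          if (PySem.Dict.mk sign_info).contains sign then
            d.modify ((PySem.Dict.mk ((PySem.Dict.mk sign_info).getD sign [])).getD key "") []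
              (fun l => l ++ [sign])
          else d) PySem.Dict.empty).keys (fun x => x) false) 0).foldl
      (fun (d : PySem.Dict String Int) p =>
        ((signs.foldl (fun (d : PySem.Dict String (List String)) sign =>
          if (PySem.Dict.mk sign_info).contains sign then
            d.modify ((PySem.Dict.mk ((PySem.Dict.mk sign_info).getD sign [])).getD key "") []
              (fun l => l ++ [sign])
          else d) PySem.Dict.empty).getD p.2 []).foldl (fun d s => d.insert s p.1) d)
      PySem.Dict.empty).items
    = (pvAltLabels (PySem.List.dedup (signs.filter (fun s => (PySem.Dict.mk sign_info).contains s)))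
        (PySem.Dict.mk sign_info) key).items := by
  set I := PySem.Dict.mk sign_info with hI
  set f : String → String := fun s => (PySem.Dict.mk (I.getD s [])).getD key "" with hf
  set pres := signs.filter (fun s => I.contains s) with hpres
  have hfold : (signs.foldl (fun (d : PySem.Dict String (List String)) sign =>
        if I.contains sign then
          d.modify ((PySem.Dict.mk (I.getD sign [])).getD key "") [] (fun l => l ++ [sign])
        else d) PySem.Dict.empty)
      = pres.foldl (fun (d : PySem.Dict String (List String)) sign =>
          d.modify (f sign) [] (fun l => l ++ [sign])) PySem.Dict.empty := by
    rw [hpres]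
    exact (List.foldl_filter).symm
  rw [hfold]
  set g := pres.foldl (fun (d : PySem.Dict String (List String)) sign =>
      d.modify (f sign) [] (fun l => l ++ [sign])) PySem.Dict.empty with hg
  have hkeys : g.keys = PySem.List.dedup (pres.map f) := by
    rw [hg, PySem.Dict.keys_foldl_modify_key pres f [] (fun _ x => fun l => l ++ [x]),
      PySem.Dict.keys_empty, PySem.Set.update_nil_left, PySem.List.dedup_eq_ofList]
  have hgetD : ∀ c, g.getD c [] = pres.filter (fun s => f s == c) := by
    intro c
    have hmap : g = (pres.map (fun s => (f s, s))).foldl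
        (fun (d : PySem.Dict String (List String)) p => d.modify p.1 [] (fun l => l ++ [p.2]))
        PySem.Dict.empty := by
      rw [hg, List.foldl_map]
    rw [hmap, PySem.Dict.getD_foldl_modify_append, List.filter_map]
    simp [Function.comp_def]
  rw [hkeys]
  have hfun : (fun (d : PySem.Dict String Int) (p : Int × String) =>
        (g.getD p.2 []).foldl (fun d s => d.insert s p.1) d)
      = (fun (d : PySem.Dict String Int) (p : Int × String) =>
        (pres.filter (fun s => f s == p.2)).foldl (fun d s => d.insert s p.1) d) := by
    funext d p
    rw [hgetD]
  rw [hfun]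
  have hCpair : (PySem.List.sorted (PySem.List.dedup (pres.map f)) (fun x => x) false).Pairwise (· < ·) := by
    rw [PySem.List.dedup_eq_ofList]
    exact PySem.List.sorted_ofList_pairwise_lt (pres.map f)
  have hCnd : (PySem.List.sorted (PySem.List.dedup (pres.map f)) (fun x => x) false).Nodup :=
    hCpair.imp ne_of_lt
  have hndE : (PySem.Dict.empty : PySem.Dict String Int).keys.Nodup := by simp
  have hcontE : ∀ c ∈ (PySem.List.sorted (PySem.List.dedup (pres.map f)) (fun x => x) false),
      ∀ s ∈ pres, f s = c → (PySem.Dict.empty : PySem.Dict String Int).contains s = false := by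
    intro c _ s _ _
    simp
  rw [pv_labelA pres f _ 0 PySem.Dict.empty hndE hCnd hcontE]
  -- RHS
  rw [pvAltLabels]
  rw [pv_sorted_groups (PySem.List.dedup pres) f, pv_sortedClasses_eq pres f]
  have hne : ∀ c ∈ (PySem.List.sorted (PySem.List.dedup (pres.map f)) (fun x => x) false),
      (PySem.List.dedup pres).filter (fun s => f s == c) ≠ [] := by
    intro c hc
    rw [PySem.List.mem_sorted, PySem.List.mem_dedup] at hc
    obtain ⟨s, hs, hfs⟩ := List.mem_map.1 hc
    apply List.ne_nil_of_mem (a := s)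
    rw [List.mem_filter, PySem.List.mem_dedup]
    exact ⟨hs, by simp [hfs]⟩
  have hprevE : ∀ c ∈ (PySem.List.sorted (PySem.List.dedup (pres.map f)) (fun x => x) false),
      (none : Option String) ≠ some c := by intro c _ h; cases h
  rw [pv_labelB pres f _ PySem.Dict.empty none (-1) hndE hCnd hprevE hcontE hne]
  norm_num

-- ===== VERDICT (by name: the statement is the Claim_ definition above) =====
theorem build_cypriot_ground_truth_spec : Claim_equal_build_cypriot_ground_truth := by
  unfold Claim_equal_build_cypriot_ground_truth
  intro signs sign_info _ _
  unfold Spec_build_cypriot_ground_truth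
  simp only [build_cypriot_ground_truth, build_cypriot_ground_truth_alt]
  rw [pv_foldl_prod_if (fun sign => (PySem.Dict.mk sign_info).contains sign)
      (fun (a : PySem.Dict String (List String)) sign =>
        a.modify ((PySem.Dict.mk ((PySem.Dict.mk sign_info).getD sign [])).getD "consonant" "")
          [] (fun l => l ++ [sign]))
      (fun (b : PySem.Dict String (List String)) sign =>
        b.modify ((PySem.Dict.mk ((PySem.Dict.mk sign_info).getD sign [])).getD "vowel" "")
          [] (fun l => l ++ [sign]))
      signs PySem.Dict.empty PySem.Dict.empty]
  exact Prod.ext (pv_one_key signs sign_info "consonant") (pv_one_key signs sign_info "vowel")
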